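-- pv_equiv track=rewrite | github.com/MrFlynn/course-code | string_recurrence/string.py | reverse_string_build
-- ===== SOURCE A (Python) =====
-- def reverse_string_build(prev: str, size: int, base_strs: list) -> list:
--     """Recursively generates a list of all strings of `size` containing all
--     valid combiantions (i.e. the combination fits within the specific size) of
--     `base_strs` prepended to the input string `prev`.
--
--     :param prev: previous strings to prepend valid combinations too.
--     :param size: remainaing size of string.
--     :param base_strs: list of all strings that may be prepended to `prev`.
--     :return: list of valid combinations of `prev` and `base_strs`.
--     """
--
--     # Filter `base_strs` to just those of length `size`.
--     prepenable_strings = list(filter(lambda x: len(x) <= size, base_strs))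
--     full_branch = []
--
--     if size > 0:
--         for s in prepenable_strings:
--             full_branch.append(s + prev)
--
--             # Recursive call to this function, but with size limited and
--             # `prev` modified.
--             sub_branch = reverse_string_build(s + prev,
--                             size - len(s),
--                             base_strs)
--             full_branch.extend(sub_branch)
--
--     return full_branch
-- ===== SOURCE B (Python) =====
-- def reverse_string_build(prev: str, size: int, base_strs: list) -> list:
--     """Iterative re-implementation: explicit LIFO stack of (emit, prev, size)
--     frames reproducing A's pre-order DFS sequence."""
--     results = []
--     stack = [(None, prev, size)]
--     while stack:
--         emit, p, sz = stack.pop()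
--         if emit is not None:
--             results.append(emit)
--         if sz > 0:
--             prepenable = [s for s in base_strs if len(s) <= sz]
--             for s in reversed(prepenable):
--                 stack.append((s + p, s + p, sz - len(s)))
--     return results
-- ===== Notes on version B (the rewrite author's own statement) =====
-- stated objective: alternative
-- what changed: Replaces A's recursion with an iterative explicit LIFO stack of (emit, prev, size) frames, pushing children in reversed order and emitting on pop, producing the same pre-order DFS list without Python recursion.
import Mathlib
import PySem

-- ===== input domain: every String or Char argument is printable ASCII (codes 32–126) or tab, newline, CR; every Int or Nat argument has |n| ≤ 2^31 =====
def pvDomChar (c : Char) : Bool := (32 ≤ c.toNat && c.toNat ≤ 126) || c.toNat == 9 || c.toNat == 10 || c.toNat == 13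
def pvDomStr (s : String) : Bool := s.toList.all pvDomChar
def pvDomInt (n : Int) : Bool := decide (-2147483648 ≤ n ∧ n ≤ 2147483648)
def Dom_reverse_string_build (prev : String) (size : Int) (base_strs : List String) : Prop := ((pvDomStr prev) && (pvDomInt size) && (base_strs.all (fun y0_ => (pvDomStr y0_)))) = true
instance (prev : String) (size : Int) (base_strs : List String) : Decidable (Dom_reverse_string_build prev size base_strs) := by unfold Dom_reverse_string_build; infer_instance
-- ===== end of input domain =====

-- B replaces A's recursion by an iterative explicit LIFO stack (same pre-order DFS output, no Python recursion).

-- ===== PORT A =====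
-- Literal port of A's recursion. The `if s.length = 0` branch is a totality guard only:
-- Python diverges (RecursionError) there, and such inputs are excluded by Pre_.
def reverse_string_build (prev : String) (size : Int) (base_strs : List String) : List String :=
  let prepenable := base_strs.filter (fun x => decide ((x.length : Int) ≤ size))
  if _h : size > 0 then
    prepenable.attach.flatMap (fun ⟨s, _hs⟩ =>
      (s ++ prev) ::
        (if _hl : s.length = 0 then []
         else reverse_string_build (s ++ prev) (size - (s.length : Int)) base_strs))
  else []
termination_by size.toNat
decreasing_by
  simp only [prepenable, List.mem_filter, decide_eq_true_eq] at _hs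
  omega

-- ===== PORT B =====
-- weight of a stack frame, used only as the loop's termination measure
def pvFrameW (b : Nat) (f : Option String × String × Int) : Nat := (b + 1) ^ f.2.2.toNat

-- the measure bound cited by the loop's decreasing_by: the frames pushed for one popped
-- frame of positive size together weigh strictly less than the popped frame
theorem pv_sum_lt (b : Nat) (n : Int) (hn : 0 < n) (fr : List (Option String × String × Int))
    (hlen : fr.length ≤ b) (hw : ∀ f ∈ fr, f.2.2.toNat < n.toNat) :
    (fr.map (pvFrameW b)).sum < (b + 1) ^ n.toNat := by
  obtain ⟨m, hm⟩ : ∃ m, n.toNat = m + 1 := ⟨n.toNat - 1, by omega⟩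
  have hb : ∀ x ∈ fr.map (pvFrameW b), x ≤ (b + 1) ^ m := by
    intro x hx
    obtain ⟨f, hf, rfl⟩ := List.mem_map.mp hx
    have := hw f hf
    simpa [pvFrameW] using Nat.pow_le_pow_right (by omega : 1 ≤ b + 1) (by omega : f.2.2.toNat ≤ m)
  have hsum := List.sum_le_card_nsmul _ _ hb
  simp only [smul_eq_mul, List.length_map] at hsum
  have h1 : (fr.map (pvFrameW b)).sum ≤ b * (b + 1) ^ m :=
    le_trans hsum (Nat.mul_le_mul_right _ hlen)
  have hX : 1 ≤ (b + 1) ^ m := Nat.one_le_pow _ _ (by omega)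
  have h2 : (b + 1) ^ n.toNat = b * (b + 1) ^ m + (b + 1) ^ m := by
    rw [hm, pow_succ]; ring
  omega

-- the while-loop of Source B: pop a frame, emit, push the children (in prepenable order on top).
-- The `.filter (s.length ≠ 0)` on the pushed children is a totality guard only:
-- Python's loop diverges there, and such inputs are excluded by Pre_.
def rsbAltLoop (base : List String) (stack : List (Option String × String × Int)) (results : List String) : List String :=
  match stack with
  | [] => results
  | (emit, p, sz) :: rest =>
    if _h : sz > 0 then
      rsbAltLoop base
        (((base.filter (fun s => decide ((s.length : Int) ≤ sz))).filter
            (fun s => decide (s.length ≠ 0))).map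
            (fun s => ((some (s ++ p) : Option String), s ++ p, sz - (s.length : Int))) ++ rest)
        (match emit with | some e => results ++ [e] | none => results)
    else
      rsbAltLoop base rest (match emit with | some e => results ++ [e] | none => results)
termination_by (stack.map (pvFrameW base.length)).sum
decreasing_by
  · simp only [List.map_append, List.sum_append, List.map_cons, List.sum_cons]
    refine Nat.add_lt_add_right ?_ _
    refine pv_sum_lt base.length sz _h _ ?_ ?_
    · simp only [List.length_map]
      refine le_trans (List.length_filter_le _ _) (le_trans (List.length_filter_le _ _) ?_)
      simp
    · intro f hf
      simp only [List.mem_map, List.mem_filter, List.mem_attach, true_and,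
        decide_eq_true_eq] at hf
      obtain ⟨⟨s, hs⟩, ⟨h1, h2⟩, rfl⟩ := hf
      simp only at h1 h2 ⊢
      omega
  · have h1 : 1 ≤ pvFrameW base.length (emit, p, sz) := Nat.one_le_pow _ _ (by omega)
    simp only [List.map_cons, List.sum_cons]
    omega

def reverse_string_build_alt (prev : String) (size : Int) (base_strs : List String) : List String :=
  rsbAltLoop base_strs [(none, prev, size)] []

-- ===== PRECONDITION & SPEC =====
-- Pre_ excludes inputs where base_strs contains the empty string while size > 0: there
-- Python A recurses forever on the same size and raises RecursionError (B's loop diverges too).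
def Pre_reverse_string_build (prev : String) (size : Int) (base_strs : List String) : Prop :=
  "" ∈ base_strs → size ≤ 0
instance (prev : String) (size : Int) (base_strs : List String) : Decidable (Pre_reverse_string_build prev size base_strs) := by unfold Pre_reverse_string_build; infer_instance

def pvWitness_reverse_string_build : String × Int × List String := ("", 0, [])

def Spec_reverse_string_build (prev : String) (size : Int) (base_strs : List String) (out : List String) : Prop := out = reverse_string_build_alt prev size base_strs
instance (prev : String) (size : Int) (base_strs : List String) (out : List String) : Decidable (Spec_reverse_string_build prev size base_strs out) := by unfold Spec_reverse_string_build; infer_instance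

-- ===== CLAIM (what is proved, stated in full; the proofs are below) =====
def Claim_equal_reverse_string_build : Prop := ∀ (prev : String) (size : Int) (base_strs : List String), Dom_reverse_string_build prev size base_strs → Pre_reverse_string_build prev size base_strs → Spec_reverse_string_build prev size base_strs (reverse_string_build prev size base_strs)

-- ===== LEMMAS AND PROOFS =====

-- what one stack frame contributes to the final output
def pvFrameOut (base : List String) (f : Option String × String × Int) : List String :=
  (match f.1 with | some e => [e] | none => []) ++ reverse_string_build f.2.1 f.2.2 base

theorem loop_eq (base : List String) (hne : "" ∉ base) :
    ∀ (N : Nat) (stack : List (Option String × String × Int)) (results : List String),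
      (stack.map (pvFrameW base.length)).sum ≤ N →
      rsbAltLoop base stack results = results ++ stack.flatMap (pvFrameOut base) := by
  have unfold_pos : ∀ (prev : String) (size : Int), size > 0 →
      reverse_string_build prev size base =
        (base.filter (fun x => decide ((x.length : Int) ≤ size))).flatMap
          (fun s => (s ++ prev) :: reverse_string_build (s ++ prev) (size - (s.length : Int)) base) := by
    intro prev size h
    rw [reverse_string_build]
    simp only [h, dite_true]
    have hf : (fun (x : {s // s ∈ base.filter (fun x => decide ((x.length : Int) ≤ size))}) =>
        (x.1 ++ prev) ::
          (if _hl : x.1.length = 0 then []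
           else reverse_string_build (x.1 ++ prev) (size - (x.1.length : Int)) base)) =
        (fun x => ((x.1 ++ prev) :: reverse_string_build (x.1 ++ prev) (size - (x.1.length : Int)) base)) := by
      funext x
      have hs' : x.1 ∈ base := List.mem_of_mem_filter x.2
      have hns : x.1.length ≠ 0 := by
        intro h0
        exact hne (by simpa [String.length_eq_zero_iff.mp h0] using hs')
      simp [hns]
    rw [hf]
    conv_rhs => rw [← List.attach_map_subtype_val (base.filter (fun x => decide ((x.length : Int) ≤ size)))]
    rw [List.flatMap_map]
  intro N
  induction N using Nat.strong_induction_on with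
  | _ N ih =>
    intro stack results hN
    match stack with
    | [] => rw [rsbAltLoop]; simp
    | (emit, p, sz) :: rest =>
      rw [rsbAltLoop.eq_def]
      simp only
      by_cases hsz : sz > 0
      · simp only [dif_pos hsz]
        set children := ((base.filter (fun s => decide ((s.length : Int) ≤ sz))).filter
            (fun s => decide (s.length ≠ 0))).map
            (fun s => ((some (s ++ p) : Option String), s ++ p, sz - (s.length : Int))) with hcdef
        have hdec : ((children ++ rest).map (pvFrameW base.length)).sum <
            (((emit, p, sz) :: rest).map (pvFrameW base.length)).sum := by
          simp only [List.map_append, List.sum_append, List.map_cons, List.sum_cons]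
          refine Nat.add_lt_add_right ?_ _
          refine pv_sum_lt base.length sz hsz _ ?_ ?_
          · simp only [hcdef, List.length_map]
            exact le_trans (List.length_filter_le _ _) (List.length_filter_le _ _)
          · intro f hf
            simp only [hcdef, List.mem_map, List.mem_filter, decide_eq_true_eq] at hf
            obtain ⟨s, ⟨⟨_, h1⟩, h2⟩, rfl⟩ := hf
            simp only
            omega
        have hM : ((children ++ rest).map (pvFrameW base.length)).sum < N :=
          lt_of_lt_of_le hdec hN
        rw [ih _ hM _ _ (le_refl _)]
        have hfe : (base.filter (fun s => decide ((s.length : Int) ≤ sz))).filter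
            (fun s => decide (s.length ≠ 0)) = base.filter (fun s => decide ((s.length : Int) ≤ sz)) := by
          apply List.filter_eq_self.mpr
          intro s hs
          have hs' : s ∈ base := List.mem_of_mem_filter hs
          simp only [decide_eq_true_eq]
          intro h0
          exact hne (by simpa [String.length_eq_zero_iff.mp h0] using hs')
        have hch : children.flatMap (pvFrameOut base) = reverse_string_build p sz base := by
          rw [hcdef, hfe, List.flatMap_map, unfold_pos p sz hsz]
          apply List.flatMap_congr
          intro s _
          simp [pvFrameOut]
        simp only [List.flatMap_append, hch]
        cases emit <;> simp [pvFrameOut, List.append_assoc]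
      · simp only [dif_neg hsz]
        have hM : (rest.map (pvFrameW base.length)).sum < N := by
          have h1 : 1 ≤ pvFrameW base.length (emit, p, sz) := Nat.one_le_pow _ _ (by omega)
          simp only [List.map_cons, List.sum_cons] at hN
          omega
        rw [ih _ hM _ _ (le_refl _)]
        have hz : reverse_string_build p sz base = [] := by
          rw [reverse_string_build]; simp [hsz]
        cases emit <;> simp [pvFrameOut, hz]

-- ===== VERDICT (by name: the statement is the Claim_ definition above) =====
theorem reverse_string_build_spec : Claim_equal_reverse_string_build := by
  intro prev size base _hdom hpre
  unfold Spec_reverse_string_build reverse_string_build_alt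
  by_cases hsz : size > 0
  · have hne : "" ∉ base := fun hmem => absurd (hpre hmem) (by omega)
    rw [loop_eq base hne _ _ _ (le_refl _)]
    simp [pvFrameOut]
  · rw [reverse_string_build, rsbAltLoop]
    simp only [hsz, dite_false]
    rw [rsbAltLoop]
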